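-- pv_equiv track=rewrite | github.com/pypi-data/pypi-mirror-391 | packages/cellarc/cellarc-0.1.2-py3-none-any.whl/cellarc/solver.py | _centered_window
-- ===== SOURCE A (Python) =====
-- from typing import Dict, Iterable, List, Optional, Sequence, Tuple
--
-- Symbol = int
--
-- Word = List[Symbol]
--
-- Window = Tuple[Symbol, ...]
--
-- def _centered_window(seq: Word, i: int, W: int, wrap: bool) -> Window:
--     """Return the length-W window centered at i (half = (W-1)//2)."""
--     n = len(seq)
--     half = W // 2
--     if wrap:
--         return tuple(seq[(i - half + j) % n] for j in range(W))
--     out: List[Symbol] = []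
--     for j in range(i - half, i + half + 1):
--         if 0 <= j < n:
--             out.append(seq[j])
--         else:
--             out.append(0)
--     return tuple(out)
-- ===== SOURCE B (Python) =====
-- def _centered_window(seq, i, W, wrap):
--     """Return the length-W window centered at i (half = (W-1)//2)."""
--     n = len(seq)
--     half = W // 2
--     if wrap:
--         return tuple(seq[(i - half + j) % n] for j in range(W))
--     start, end = i - half, i + half + 1
--     left = max(0, min(end, 0) - start)
--     right = max(0, end - max(start, n))
--     return tuple([0] * left + seq[max(start, 0):max(0, min(end, n))] + [0] * right)
-- ===== Notes on version B (the rewrite author's own statement) =====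
-- stated objective: simpler
-- what changed: The non-wrap branch's per-index bounds-checked loop is replaced by one clamped slice of seq with left/right zero-padding counts computed arithmetically; the wrap branch keeps the same modulo construction.
import Mathlib
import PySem

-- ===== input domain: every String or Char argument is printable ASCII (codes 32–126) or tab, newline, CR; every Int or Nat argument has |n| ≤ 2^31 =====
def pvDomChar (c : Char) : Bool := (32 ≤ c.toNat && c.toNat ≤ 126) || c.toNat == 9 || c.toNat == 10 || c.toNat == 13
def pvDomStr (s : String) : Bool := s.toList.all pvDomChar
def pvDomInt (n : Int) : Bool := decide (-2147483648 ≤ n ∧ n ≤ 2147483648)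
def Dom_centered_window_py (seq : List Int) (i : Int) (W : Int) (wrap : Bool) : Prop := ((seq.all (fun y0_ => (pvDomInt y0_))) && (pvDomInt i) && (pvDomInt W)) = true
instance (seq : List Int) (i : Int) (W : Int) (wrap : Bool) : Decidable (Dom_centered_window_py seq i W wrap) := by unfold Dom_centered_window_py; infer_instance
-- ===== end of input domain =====

-- B replaces A's per-index bounds-checked loop (non-wrap branch) with a clamped slice plus
-- arithmetically computed left/right zero padding; objective: simpler. Pre_ excludes only the
-- ZeroDivisionError inputs (wrap with empty seq and W > 0), where both Pythons raise.


-- ===== PORT A =====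
def centered_window_py (seq : List Int) (i : Int) (W : Int) (wrap : Bool) : List Int :=
  let n : Int := seq.length
  let half : Int := PySem.Int.floordiv W 2
  if wrap then
    (PySem.List.pyRange 0 W 1).map (fun j => PySem.List.pyGetD seq (PySem.Int.mod (i - half + j) n) 0)
  else
    (PySem.List.pyRange (i - half) (i + half + 1) 1).foldl
      (fun out j => if 0 ≤ j ∧ j < n then out ++ [PySem.List.pyGetD seq j 0] else out ++ [0]) []

-- ===== PORT B =====
def centered_window_py_alt (seq : List Int) (i : Int) (W : Int) (wrap : Bool) : List Int :=
  let n : Int := seq.length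
  let half : Int := PySem.Int.floordiv W 2
  if wrap then
    (PySem.List.pyRange 0 W 1).map (fun j => PySem.List.pyGetD seq (PySem.Int.mod (i - half + j) n) 0)
  else
    let s : Int := i - half
    let e : Int := i + half + 1
    let left : Int := max 0 (min e 0 - s)
    let right : Int := max 0 (e - max s n)
    List.replicate left.toNat 0
      ++ PySem.List.slice seq (some (max s 0)) (some (max 0 (min e n)))
      ++ List.replicate right.toNat 0

-- ===== PRECONDITION & SPEC =====
-- Pre_ excludes exactly the inputs (wrap = true, seq empty, W > 0) on which A's modulo raises ZeroDivisionError.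
def Pre_centered_window_py (seq : List Int) (i : Int) (W : Int) (wrap : Bool) : Prop :=
  ¬ (wrap = true ∧ seq = [] ∧ 1 ≤ W)
instance (seq : List Int) (i : Int) (W : Int) (wrap : Bool) : Decidable (Pre_centered_window_py seq i W wrap) := by unfold Pre_centered_window_py; infer_instance
def pvWitness_centered_window_py : List Int × Int × Int × Bool := ([1, 2, 3], 1, 3, false)

def Spec_centered_window_py (seq : List Int) (i : Int) (W : Int) (wrap : Bool) (out : List Int) : Prop := out = centered_window_py_alt seq i W wrap
instance (seq : List Int) (i : Int) (W : Int) (wrap : Bool) (out : List Int) : Decidable (Spec_centered_window_py seq i W wrap out) := by unfold Spec_centered_window_py; infer_instance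

-- ===== CLAIM (what is proved, stated in full; the proofs are below) =====
def Claim_equal_centered_window_py : Prop := ∀ (seq : List Int) (i : Int) (W : Int) (wrap : Bool), Dom_centered_window_py seq i W wrap → Pre_centered_window_py seq i W wrap → Spec_centered_window_py seq i W wrap (centered_window_py seq i W wrap)

-- ===== LEMMAS AND PROOFS =====

-- A's loop body appends a singleton in both branches: pull the ite inside the append.
theorem fold_body_eq (n : Int) (seq : List Int) :
    (fun (out : List Int) (j : Int) => if 0 ≤ j ∧ j < n then out ++ [PySem.List.pyGetD seq j 0] else out ++ [0])
      = fun out j => out ++ [if 0 ≤ j ∧ j < n then PySem.List.pyGetD seq j 0 else 0] := by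
  funext out j; split_ifs <;> rfl

-- The heart of the equivalence: mapping A's bounds-checked lookup over [s, e) equals
-- left zeros ++ clamped slice ++ right zeros, by induction on the window length.
theorem map_window (seq : List Int) (k : Nat) : ∀ (s e : Int), (e - s).toNat = k →
    ((PySem.List.pyRange s e 1).map
        (fun j => if 0 ≤ j ∧ j < (seq.length : Int) then PySem.List.pyGetD seq j 0 else 0))
      = List.replicate (max 0 (min e 0 - s)).toNat 0
        ++ PySem.List.slice seq (some (max s 0)) (some (max 0 (min e (seq.length : Int))))
        ++ List.replicate (max 0 (e - max s (seq.length : Int))).toNat 0 := by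
  induction k with
  | zero =>
    intro s e hk
    have hes : e ≤ s := by omega
    rw [PySem.List.pyRange_one_eq_nil hes, PySem.List.slice_toNat seq (by omega) (by omega)]
    have h1 : (max 0 (min e 0 - s)).toNat = 0 := by omega
    have h2 : (max 0 (e - max s (seq.length : Int))).toNat = 0 := by omega
    have h3 : (max 0 (min e (seq.length : Int))).toNat - (max s 0).toNat = 0 := by omega
    simp [h1, h2, h3]
  | succ k ih =>
    intro s e hk
    have hse : s < e := by omega
    rw [PySem.List.pyRange_one_cons hse, List.map_cons, ih (s + 1) e (by omega)]
    by_cases hs0 : s < 0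
    · -- left padding region
      have hL : (max 0 (min e 0 - s)).toNat = (max 0 (min e 0 - (s + 1))).toNat + 1 := by omega
      have hlo : max (s + 1) 0 = max s 0 := by omega
      have hhi : max (s + 1) (seq.length : Int) = max s (seq.length : Int) := by omega
      rw [hL, List.replicate_succ, hlo, hhi]
      simp [hs0]
    · by_cases hsn : s < (seq.length : Int)
      · -- middle region: peel one element off the slice
        have h0s : 0 ≤ s := by omega
        have hL1 : (max 0 (min e 0 - s)).toNat = 0 := by omega
        have hL2 : (max 0 (min e 0 - (s + 1))).toNat = 0 := by omega
        have hhiR : max (s + 1) (seq.length : Int) = max s (seq.length : Int) := by omega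
        have hlo1 : max s 0 = s := by omega
        have hlo2 : max (s + 1) 0 = s + 1 := by omega
        rw [hL1, hL2, hhiR, hlo1, hlo2,
            PySem.List.slice_toNat seq (by omega) (by omega),
            PySem.List.slice_toNat seq (by omega) (by omega)]
        have hmem : s.toNat < seq.length := by omega
        have hdrop : seq.drop s.toNat = seq[s.toNat] :: seq.drop (s.toNat + 1) :=
          List.drop_eq_getElem_cons hmem
        have htk : (max 0 (min e (seq.length : Int))).toNat - s.toNat
            = ((max 0 (min e (seq.length : Int))).toNat - (s + 1).toNat) + 1 := by omega
        have hd1 : (s + 1).toNat = s.toNat + 1 := by omega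
        rw [htk, hdrop, List.take_succ_cons, hd1]
        have hval : (if 0 ≤ s ∧ s < (seq.length : Int) then PySem.List.pyGetD seq s 0 else 0)
            = seq[s.toNat] := by
          rw [if_pos ⟨h0s, hsn⟩]; exact PySem.List.pyGetD_eq_getElem seq 0 h0s hsn
        rw [hval]; simp
      · -- right padding region
        have hL1 : (max 0 (min e 0 - s)).toNat = 0 := by omega
        have hL2 : (max 0 (min e 0 - (s + 1))).toNat = 0 := by omega
        have hR : (max 0 (e - max s (seq.length : Int))).toNat
            = (max 0 (e - max (s + 1) (seq.length : Int))).toNat + 1 := by omega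
        rw [hL1, hL2, hR, PySem.List.slice_toNat seq (by omega) (by omega),
            PySem.List.slice_toNat seq (by omega) (by omega)]
        have h3 : (max 0 (min e (seq.length : Int))).toNat - (max s 0).toNat = 0 := by omega
        have h4 : (max 0 (min e (seq.length : Int))).toNat - (max (s + 1) 0).toNat = 0 := by omega
        have hval : (if 0 ≤ s ∧ s < (seq.length : Int) then PySem.List.pyGetD seq s 0 else 0) = 0 := by
          rw [if_neg]; omega
        rw [h3, h4, hval]
        simp [List.replicate_succ]

-- ===== VERDICT (by name: the statement is the Claim_ definition above) =====
theorem centered_window_py_spec : Claim_equal_centered_window_py := by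
  intro seq i W wrap _ _
  unfold Spec_centered_window_py centered_window_py centered_window_py_alt
  cases wrap with
  | true => rfl
  | false =>
    simp only [if_neg (by simp : ¬ (false = true))]
    rw [fold_body_eq, PySem.List.foldl_append_singleton_eq_map]
    exact map_window seq _ _ _ rfl
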